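-- pv_equiv track=rewrite | github.com/samuelgzx/RL_GuanDan | guandan/env_utils.py | _get_action_seq
-- ===== SOURCE A (Python) =====
-- import copy
--
-- def _get_action_seq(action_history, start_player):
--     max_len = max([len(action_history[i]) for i in range(4)])
--     current_index = 0
--     action_seq = []
--     while current_index < max_len:
--         current_round_action = []
--         cnt = 0
--         for i in range(4):
--             player_id = (start_player + i) % 4
--             if len(action_history[player_id]) <= current_index:
--                 # zero padding
--                 current_round_action.append([])
--                 cnt += 1
--             else:
--                 current_round_action.append(copy.deepcopy(action_history[player_id][current_index]))
--         assert cnt < 4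
--         current_index += 1
--         action_seq.extend(current_round_action)
--     return action_seq
-- ===== SOURCE B (Python) =====
-- import copy
--
-- def _get_action_seq(action_history, start_player):
--     # scatter approach: preallocate a flat buffer of 4*n empty pads, then write
--     # each player's history column-wise into its seat's slots
--     players = [action_history[(start_player + k) % 4] for k in range(4)]
--     n = max(map(len, players))
--     out = [[] for _ in range(4 * n)]
--     for k, h in enumerate(players):
--         for r, a in enumerate(h):
--             out[4 * r + k] = copy.deepcopy(a)
--     return out
-- ===== Notes on version B (the rewrite author's own statement) =====
-- stated objective: alternative
-- what changed: B preallocates a flat buffer of 4*max_len empty pads and scatters each player's history column-wise into its seat's slots (player-major writes), instead of A's round-major loop that bound-checks each player and appends row by row.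
import Mathlib
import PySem

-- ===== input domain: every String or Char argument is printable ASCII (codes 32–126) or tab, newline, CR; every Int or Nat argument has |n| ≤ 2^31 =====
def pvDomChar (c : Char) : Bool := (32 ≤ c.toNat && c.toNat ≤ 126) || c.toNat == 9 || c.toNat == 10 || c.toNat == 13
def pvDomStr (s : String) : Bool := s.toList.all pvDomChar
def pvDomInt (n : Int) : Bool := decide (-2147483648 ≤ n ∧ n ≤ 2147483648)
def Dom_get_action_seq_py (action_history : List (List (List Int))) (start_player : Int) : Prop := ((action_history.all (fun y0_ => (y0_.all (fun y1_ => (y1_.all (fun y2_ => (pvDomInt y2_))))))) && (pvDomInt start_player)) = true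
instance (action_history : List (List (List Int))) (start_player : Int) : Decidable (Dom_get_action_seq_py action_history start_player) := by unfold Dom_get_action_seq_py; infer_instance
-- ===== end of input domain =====

-- B preallocates a flat 4*max_len buffer of empty pads and scatters each player's
-- history column-wise into it, instead of A's round-major append loop; return-value
-- equivalence on histories with ≥ 4 per-player lists.

-- ===== PORT A =====
def get_action_seq_py (action_history : List (List (List Int))) (start_player : Int) : List (List Int) :=
  let lens : List Int := (PySem.List.pyRange 0 4 1).map
    (fun i => (((PySem.List.pyGet? action_history i).getD []).length : Int))
  let max_len : Int := (PySem.List.max? lens (fun x => x)).getD 0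
  (PySem.List.pyRange 0 max_len 1).foldl (fun seq ci =>
    seq ++ (PySem.List.pyRange 0 4 1).foldl (fun cur i =>
      let pid := PySem.Int.mod (start_player + i) 4
      let pl := (PySem.List.pyGet? action_history pid).getD []
      if (pl.length : Int) ≤ ci then cur ++ [[]]
      else cur ++ [(PySem.List.pyGet? pl ci).getD []]) []) []

-- ===== PORT B =====
-- Source B's inner loop 'for r, a in enumerate(h): out[4*r+k] = a', transcribed as a
-- recursion carrying the enumerate index r
def pvFill (o : List (List Int)) (k r : Nat) : List (List Int) → List (List Int)
  | [] => o
  | a :: t => pvFill (o.set (4 * r + k) a) k (r + 1) t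

def get_action_seq_py_alt (action_history : List (List (List Int))) (start_player : Int) : List (List Int) :=
  let g : Nat → List (List Int) := fun k =>
    (PySem.List.pyGet? action_history (PySem.Int.mod (start_player + (k : Int)) 4)).getD []
  let p0 := g 0
  let p1 := g 1
  let p2 := g 2
  let p3 := g 3
  let n := max (max (max p0.length p1.length) p2.length) p3.length
  let base : List (List Int) := List.replicate (4 * n) []
  pvFill (pvFill (pvFill (pvFill base 0 0 p0) 1 0 p1) 2 0 p2) 3 0 p3

-- ===== PRECONDITION & SPEC =====
-- Pre_ excludes exactly the histories with fewer than 4 per-player lists, on which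
-- both Pythons raise IndexError.
def Pre_get_action_seq_py (action_history : List (List (List Int))) (start_player : Int) : Prop :=
  4 ≤ action_history.length
instance (action_history : List (List (List Int))) (start_player : Int) : Decidable (Pre_get_action_seq_py action_history start_player) := by unfold Pre_get_action_seq_py; infer_instance

def pvWitness_get_action_seq_py : List (List (List Int)) × Int :=
  ([[[1, 2]], [], [[3]], [[4], [5]]], 2)

def Spec_get_action_seq_py (action_history : List (List (List Int))) (start_player : Int) (out : List (List Int)) : Prop := out = get_action_seq_py_alt action_history start_player
instance (action_history : List (List (List Int))) (start_player : Int) (out : List (List Int)) : Decidable (Spec_get_action_seq_py action_history start_player out) := by unfold Spec_get_action_seq_py; infer_instance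

-- ===== CLAIM (what is proved, stated in full; the proofs are below) =====
def Claim_equal_get_action_seq_py : Prop := ∀ (action_history : List (List (List Int))) (start_player : Int), Dom_get_action_seq_py action_history start_player → Pre_get_action_seq_py action_history start_player → Spec_get_action_seq_py action_history start_player (get_action_seq_py action_history start_player)

-- ===== LEMMAS AND PROOFS =====

-- padded element of a history at round i ([] past the end), and a round's four-entry row
def pvPad (x : List (List Int)) (i : Nat) : List Int := (x[i]?).getD []

def pvRow (a b c d : List (List Int)) (i : Nat) : List (List Int) :=
  [pvPad a i, pvPad b i, pvPad c i, pvPad d i]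

-- one step of A's inner player loop appends exactly the padded entry
theorem pvStep_eq (cur : List (List Int)) (l : List (List Int)) (k : Nat) :
    (if (l.length : Int) ≤ (k : Int) then cur ++ [([] : List Int)]
     else cur ++ [(PySem.List.pyGet? l (k : Int)).getD []])
    = cur ++ [pvPad l k] := by
  rw [PySem.List.pyGet?_natCast]
  by_cases hc : l.length ≤ k
  · rw [if_pos (by exact_mod_cast hc)]
    simp [pvPad, List.getElem?_eq_none hc]
  · rw [if_neg (by exact_mod_cast hc)]
    rfl

-- A's result as max-many rows of padded entries over the rotated histories
theorem pvA_eq (h : List (List (List Int))) (s : Int) :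
    get_action_seq_py h s =
      (List.range (max (max (max ((PySem.List.pyGet? h 0).getD []).length
                                 ((PySem.List.pyGet? h 1).getD []).length)
                            ((PySem.List.pyGet? h 2).getD []).length)
                       ((PySem.List.pyGet? h 3).getD []).length)).flatMap
        (pvRow ((PySem.List.pyGet? h (PySem.Int.mod (s + 0) 4)).getD [])
               ((PySem.List.pyGet? h (PySem.Int.mod (s + 1) 4)).getD [])
               ((PySem.List.pyGet? h (PySem.Int.mod (s + 2) 4)).getD [])
               ((PySem.List.pyGet? h (PySem.Int.mod (s + 3) 4)).getD [])) := by
  have h4 : PySem.List.pyRange 0 4 1 = [0, 1, 2, 3] := by decide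
  unfold get_action_seq_py
  simp only [h4, List.map_cons, List.map_nil, PySem.List.max?_id_cons, Option.getD_some,
    List.foldl_cons, List.foldl_nil]
  rw [show (max (max (max (((PySem.List.pyGet? h 0).getD []).length : Int)
        (((PySem.List.pyGet? h 1).getD []).length : Int))
        (((PySem.List.pyGet? h 2).getD []).length : Int))
        (((PySem.List.pyGet? h 3).getD []).length : Int))
      = ((max (max (max ((PySem.List.pyGet? h 0).getD []).length
            ((PySem.List.pyGet? h 1).getD []).length)
            ((PySem.List.pyGet? h 2).getD []).length)
            ((PySem.List.pyGet? h 3).getD []).length : Nat) : Int) by push_cast; rfl]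
  rw [PySem.List.pyRange_zero_nat]
  rw [List.foldl_map]
  rw [PySem.List.foldl_append_eq_flatMap]
  rw [List.nil_append]
  refine congrArg (fun f => List.flatMap f (List.range _)) ?_
  funext k
  simp only [pvStep_eq]
  simp [pvRow]

theorem pvFill_length (k : Nat) (h : List (List Int)) : ∀ (o : List (List Int)) (r : Nat),
    (pvFill o k r h).length = o.length := by
  induction h with
  | nil => intro o r; rfl
  | cons a t ih => intro o r; rw [pvFill, ih, List.length_set]

theorem pvFill_get (k : Nat) (hk4 : k < 4) (h : List (List Int)) : ∀ (o : List (List Int)) (r j : Nat),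
    j < o.length →
    (pvFill o k r h)[j]? =
      if j % 4 = k ∧ r ≤ j / 4 ∧ j / 4 < r + h.length then h[j / 4 - r]? else o[j]? := by
  induction h with
  | nil => intro o r j _; simp [pvFill]
  | cons a t ih =>
    intro o r j hj
    rw [pvFill, ih _ _ _ (by simpa using hj)]
    by_cases hcase : j % 4 = k ∧ r ≤ j / 4
    · obtain ⟨hk, hlo⟩ := hcase
      by_cases heq : j / 4 = r
      · have hj4 : j = 4 * r + k := by omega
        rw [if_neg (show ¬(j % 4 = k ∧ r + 1 ≤ j / 4 ∧ j / 4 < r + 1 + t.length) by omega),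
            if_pos (show j % 4 = k ∧ r ≤ j / 4 ∧ j / 4 < r + (a :: t).length from
              ⟨hk, hlo, by simp only [List.length_cons]; omega⟩)]
        rw [show j / 4 - r = 0 by omega, hj4, List.getElem?_set_self (by omega)]
        simp
      · have hlo1 : r + 1 ≤ j / 4 := by omega
        rw [List.getElem?_set_ne (show 4 * r + k ≠ j by omega)]
        by_cases hhi : j / 4 < r + 1 + t.length
        · rw [if_pos ⟨hk, hlo1, hhi⟩,
              if_pos (show j % 4 = k ∧ r ≤ j / 4 ∧ j / 4 < r + (a :: t).length from
                ⟨hk, hlo, by simp only [List.length_cons]; omega⟩)]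
          rw [show j / 4 - r = (j / 4 - (r + 1)) + 1 by omega]
          simp
        · rw [if_neg (by omega),
              if_neg (show ¬(j % 4 = k ∧ r ≤ j / 4 ∧ j / 4 < r + (a :: t).length) by
                simp only [List.length_cons]; omega)]
    · rw [if_neg (by omega),
          if_neg (show ¬(j % 4 = k ∧ r ≤ j / 4 ∧ j / 4 < r + (a :: t).length) by
            simp only [List.length_cons]; omega),
          List.getElem?_set_ne (by omega)]

theorem pvFlatMap_row_length (f : Nat → List (List Int)) (hf : ∀ i, (f i).length = 4)
    (n : Nat) : ((List.range n).flatMap f).length = 4 * n := by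
  induction n with
  | zero => rfl
  | succ m ih =>
    rw [List.range_succ, List.flatMap_append, List.length_append, ih, List.flatMap_cons,
        List.flatMap_nil, List.append_nil, hf]
    omega

theorem pvFlatMap_row_get (n : Nat) : ∀ (f : Nat → List (List Int)),
    (∀ i, (f i).length = 4) → ∀ j, j < 4 * n →
    ((List.range n).flatMap f)[j]? = (f (j / 4))[j % 4]? := by
  induction n with
  | zero => intro f hf j hj; exact absurd hj (by omega)
  | succ m ih =>
    intro f hf j hj
    rw [List.range_succ_eq_map, List.flatMap_cons, List.flatMap_map]
    by_cases hj4 : j < 4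
    · rw [List.getElem?_append_left (by rw [hf]; omega)]
      rw [show j / 4 = 0 by omega, show j % 4 = j by omega]
    · rw [List.getElem?_append_right (by rw [hf]; omega), hf 0]
      have h2 := ih (fun i => f (i + 1)) (fun i => hf (i + 1)) (j - 4) (by omega)
      simp only [Nat.succ_eq_add_one] at h2 ⊢
      rw [h2, show (j - 4) / 4 + 1 = j / 4 by omega, show (j - 4) % 4 = j % 4 by omega]

-- the central lemma: row-major transpose = column-major scatter into a padded buffer
theorem pvMain4 (p0 p1 p2 p3 : List (List Int)) :
    (List.range (max (max (max p0.length p1.length) p2.length) p3.length)).flatMap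
        (pvRow p0 p1 p2 p3)
      = pvFill (pvFill (pvFill (pvFill
          (List.replicate
            (4 * max (max (max p0.length p1.length) p2.length) p3.length) [])
          0 0 p0) 1 0 p1) 2 0 p2) 3 0 p3 := by
  set n := max (max (max p0.length p1.length) p2.length) p3.length with hn
  have hrow : ∀ i, (pvRow p0 p1 p2 p3 i).length = 4 := by intro i; rfl
  apply List.ext_getElem?
  intro j
  by_cases hj : j < 4 * n
  · have hrep : (List.replicate (4 * n) ([] : List Int))[j]? = some [] := by
      rw [List.getElem?_eq_getElem (by simpa using hj)]
      simp
    have L3 : j < (pvFill (pvFill (pvFill (List.replicate (4 * n) ([] : List Int)) 0 0 p0) 1 0 p1) 2 0 p2).length := by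
      rw [pvFill_length, pvFill_length, pvFill_length, List.length_replicate]; omega
    have L2 : j < (pvFill (pvFill (List.replicate (4 * n) ([] : List Int)) 0 0 p0) 1 0 p1).length := by
      rw [pvFill_length, pvFill_length, List.length_replicate]; omega
    have L1 : j < (pvFill (List.replicate (4 * n) ([] : List Int)) 0 0 p0).length := by
      rw [pvFill_length, List.length_replicate]; omega
    have L0 : j < (List.replicate (4 * n) ([] : List Int)).length := by
      rw [List.length_replicate]; omega
    rw [pvFlatMap_row_get n _ hrow j hj,
        pvFill_get 3 (by omega) p3 _ 0 j L3,
        pvFill_get 2 (by omega) p2 _ 0 j L2,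
        pvFill_get 1 (by omega) p1 _ 0 j L1,
        pvFill_get 0 (by omega) p0 _ 0 j L0]
    have hm : j % 4 = 0 ∨ j % 4 = 1 ∨ j % 4 = 2 ∨ j % 4 = 3 := by omega
    rcases hm with hm | hm | hm | hm
    · rw [if_neg (show ¬(j % 4 = 3 ∧ 0 ≤ j / 4 ∧ j / 4 < 0 + p3.length) by omega),
          if_neg (show ¬(j % 4 = 2 ∧ 0 ≤ j / 4 ∧ j / 4 < 0 + p2.length) by omega),
          if_neg (show ¬(j % 4 = 1 ∧ 0 ≤ j / 4 ∧ j / 4 < 0 + p1.length) by omega)]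
      by_cases hc : j / 4 < p0.length
      · rw [if_pos (show j % 4 = 0 ∧ 0 ≤ j / 4 ∧ j / 4 < 0 + p0.length from
            ⟨hm, Nat.zero_le _, by omega⟩)]
        simp [pvRow, hm, pvPad, List.getElem?_eq_getElem hc]
      · rw [if_neg (show ¬(j % 4 = 0 ∧ 0 ≤ j / 4 ∧ j / 4 < 0 + p0.length) by omega), hrep]
        simp [pvRow, hm, pvPad, List.getElem?_eq_none (show p0.length ≤ j / 4 by omega)]
    · rw [if_neg (show ¬(j % 4 = 3 ∧ 0 ≤ j / 4 ∧ j / 4 < 0 + p3.length) by omega),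
          if_neg (show ¬(j % 4 = 2 ∧ 0 ≤ j / 4 ∧ j / 4 < 0 + p2.length) by omega)]
      by_cases hc : j / 4 < p1.length
      · rw [if_pos (show j % 4 = 1 ∧ 0 ≤ j / 4 ∧ j / 4 < 0 + p1.length from
            ⟨hm, Nat.zero_le _, by omega⟩)]
        simp [pvRow, hm, pvPad, List.getElem?_eq_getElem hc]
      · rw [if_neg (show ¬(j % 4 = 1 ∧ 0 ≤ j / 4 ∧ j / 4 < 0 + p1.length) by omega),
            if_neg (show ¬(j % 4 = 0 ∧ 0 ≤ j / 4 ∧ j / 4 < 0 + p0.length) by omega), hrep]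
        simp [pvRow, hm, pvPad, List.getElem?_eq_none (show p1.length ≤ j / 4 by omega)]
    · rw [if_neg (show ¬(j % 4 = 3 ∧ 0 ≤ j / 4 ∧ j / 4 < 0 + p3.length) by omega)]
      by_cases hc : j / 4 < p2.length
      · rw [if_pos (show j % 4 = 2 ∧ 0 ≤ j / 4 ∧ j / 4 < 0 + p2.length from
            ⟨hm, Nat.zero_le _, by omega⟩)]
        simp [pvRow, hm, pvPad, List.getElem?_eq_getElem hc]
      · rw [if_neg (show ¬(j % 4 = 2 ∧ 0 ≤ j / 4 ∧ j / 4 < 0 + p2.length) by omega),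
            if_neg (show ¬(j % 4 = 1 ∧ 0 ≤ j / 4 ∧ j / 4 < 0 + p1.length) by omega),
            if_neg (show ¬(j % 4 = 0 ∧ 0 ≤ j / 4 ∧ j / 4 < 0 + p0.length) by omega), hrep]
        simp [pvRow, hm, pvPad, List.getElem?_eq_none (show p2.length ≤ j / 4 by omega)]
    · by_cases hc : j / 4 < p3.length
      · rw [if_pos (show j % 4 = 3 ∧ 0 ≤ j / 4 ∧ j / 4 < 0 + p3.length from
            ⟨hm, Nat.zero_le _, by omega⟩)]
        simp [pvRow, hm, pvPad, List.getElem?_eq_getElem hc]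
      · rw [if_neg (show ¬(j % 4 = 3 ∧ 0 ≤ j / 4 ∧ j / 4 < 0 + p3.length) by omega),
          if_neg (show ¬(j % 4 = 2 ∧ 0 ≤ j / 4 ∧ j / 4 < 0 + p2.length) by omega),
          if_neg (show ¬(j % 4 = 1 ∧ 0 ≤ j / 4 ∧ j / 4 < 0 + p1.length) by omega),
          if_neg (show ¬(j % 4 = 0 ∧ 0 ≤ j / 4 ∧ j / 4 < 0 + p0.length) by omega), hrep]
        simp [pvRow, hm, pvPad, List.getElem?_eq_none (show p3.length ≤ j / 4 by omega)]
  · rw [List.getElem?_eq_none (by rw [pvFlatMap_row_length _ (fun i => rfl)]; omega)]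
    rw [List.getElem?_eq_none]
    rw [pvFill_length, pvFill_length, pvFill_length, pvFill_length, List.length_replicate]
    omega

-- ===== VERDICT (by name: the statement is the Claim_ definition above) =====
theorem get_action_seq_py_spec : Claim_equal_get_action_seq_py := by
  intro h s _ _
  unfold Spec_get_action_seq_py get_action_seq_py_alt
  simp only [Nat.cast_ofNat, Nat.cast_zero, Nat.cast_one]
  rw [pvA_eq]
  have e0 := PySem.Int.mod_eq_emod_of_pos (a := s + 0) (b := 4) (by norm_num)
  have e1 := PySem.Int.mod_eq_emod_of_pos (a := s + 1) (b := 4) (by norm_num)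
  have e2 := PySem.Int.mod_eq_emod_of_pos (a := s + 2) (b := 4) (by norm_num)
  have e3 := PySem.Int.mod_eq_emod_of_pos (a := s + 3) (b := 4) (by norm_num)
  have hmax : max (max (max ((PySem.List.pyGet? h 0).getD []).length
        ((PySem.List.pyGet? h 1).getD []).length)
        ((PySem.List.pyGet? h 2).getD []).length)
        ((PySem.List.pyGet? h 3).getD []).length
      = max (max (max ((PySem.List.pyGet? h (PySem.Int.mod (s + 0) 4)).getD []).length
        ((PySem.List.pyGet? h (PySem.Int.mod (s + 1) 4)).getD []).length)
        ((PySem.List.pyGet? h (PySem.Int.mod (s + 2) 4)).getD []).length)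
        ((PySem.List.pyGet? h (PySem.Int.mod (s + 3) 4)).getD []).length := by
    rw [e0, e1, e2, e3]
    have hr : s % 4 = 0 ∨ s % 4 = 1 ∨ s % 4 = 2 ∨ s % 4 = 3 := by omega
    rcases hr with hh | hh | hh | hh <;>
      [ (rw [show (s + 0) % 4 = 0 by omega, show (s + 1) % 4 = 1 by omega,
            show (s + 2) % 4 = 2 by omega, show (s + 3) % 4 = 3 by omega]);
        (rw [show (s + 0) % 4 = 1 by omega, show (s + 1) % 4 = 2 by omega,
            show (s + 2) % 4 = 3 by omega, show (s + 3) % 4 = 0 by omega]);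
        (rw [show (s + 0) % 4 = 2 by omega, show (s + 1) % 4 = 3 by omega,
            show (s + 2) % 4 = 0 by omega, show (s + 3) % 4 = 1 by omega]);
        (rw [show (s + 0) % 4 = 3 by omega, show (s + 1) % 4 = 0 by omega,
            show (s + 2) % 4 = 1 by omega, show (s + 3) % 4 = 2 by omega]) ] <;>
      omega
  rw [hmax, pvMain4]
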